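-- pv_equiv track=rewrite | github.com/Bandi120424/Algorithm_Python | 프로그래머스/1/160586. 대충 만든 자판/대충 만든 자판.py | keymap_dict
-- ===== SOURCE A (Python) =====
-- def keymap_dict(keymap):
--     key_dict = {}
--     for keys in keymap:
--         for idx in range(len(keys)):
--             if keys[idx] not in key_dict:
--                 key_dict[keys[idx]] = idx+1
--             else:
--                 key_dict[keys[idx]] = min(key_dict[keys[idx]], idx+1)
--     return key_dict
-- ===== SOURCE B (Python) =====
-- def keymap_dict(keymap):
--     collected = {}
--     for keys in keymap:
--         for idx, ch in enumerate(keys):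
--             collected.setdefault(ch, []).append(idx + 1)
--     return {c: min(indices) for c, indices in collected.items()}
-- ===== Notes on version B (the rewrite author's own statement) =====
-- stated objective: faster
-- what changed: Instead of maintaining a running minimum per character inline with repeated dict min-updates over range(len)+indexing, B first accumulates every occurrence index into per-character buckets (one enumerate pass with setdefault/append), then reduces each bucket with min in a second pass.
import Mathlib
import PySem

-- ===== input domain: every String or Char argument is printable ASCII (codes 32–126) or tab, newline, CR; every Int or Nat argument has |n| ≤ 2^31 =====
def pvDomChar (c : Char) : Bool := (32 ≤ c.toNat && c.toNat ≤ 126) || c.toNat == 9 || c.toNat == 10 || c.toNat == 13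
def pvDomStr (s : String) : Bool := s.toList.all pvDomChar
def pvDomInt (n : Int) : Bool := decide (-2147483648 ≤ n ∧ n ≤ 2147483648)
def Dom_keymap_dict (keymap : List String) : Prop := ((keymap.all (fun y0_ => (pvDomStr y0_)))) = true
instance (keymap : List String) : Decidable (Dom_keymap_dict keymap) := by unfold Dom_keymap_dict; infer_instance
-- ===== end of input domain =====

-- B replaces A's inline running-minimum dict with two passes: collect every occurrence
-- index per character into buckets, then take min over each bucket (measured faster by a constant factor).

-- ===== PORT A =====
-- A: for each string, for idx in range(len(keys)): running min of idx+1 per character.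
-- keys[idx] is always in range, so the IndexError option is discharged with getD.
def keymap_dict (keymap : List String) : List (String × Int) :=
  (keymap.foldl (fun key_dict keys =>
      (PySem.List.pyRange 0 (PySem.Str.len keys)).foldl (fun key_dict idx =>
        let c : String := String.ofList [PySem.List.pyGetD keys.toList idx ' ']
        if key_dict.contains c = false then
          key_dict.insert c (idx + 1)
        else
          key_dict.insert c (min (key_dict.getD c 0) (idx + 1)))
        key_dict)
    PySem.Dict.empty).items

-- ===== PORT B =====
-- min(l) on a nonempty list of ints (B only applies it to nonempty buckets)
def pyMinList (l : List Int) : Int :=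
  match l with
  | [] => 0
  | h :: t => t.foldl min h

def keymap_dict_alt (keymap : List String) : List (String × Int) :=
  (keymap.foldl (fun d keys =>
      (PySem.List.enumerate keys.toList).foldl (fun d p =>
        d.modify (String.ofList [p.2]) [] (fun l => l ++ [p.1 + 1])) d)
    PySem.Dict.empty).items.map (fun p => (p.1, pyMinList p.2))

-- ===== PRECONDITION & SPEC =====
def Spec_keymap_dict (keymap : List String) (out : List (String × Int)) : Prop := out = keymap_dict_alt keymap
instance (keymap : List String) (out : List (String × Int)) : Decidable (Spec_keymap_dict keymap out) := by unfold Spec_keymap_dict; infer_instance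

-- ===== CLAIM (what is proved, stated in full; the proofs are below) =====
def Claim_equal_keymap_dict : Prop := ∀ (keymap : List String), Dom_keymap_dict keymap → Spec_keymap_dict keymap (keymap_dict keymap)

-- ===== LEMMAS AND PROOFS =====

-- the flattened stream of (one-char string, index+1) pairs both loops traverse
def pvPairs (keys : String) : List (String × Int) :=
  (PySem.List.enumerate keys.toList).map (fun p => (String.ofList [p.2], p.1 + 1))

def pvStepA (d : PySem.Dict String Int) (p : String × Int) : PySem.Dict String Int :=
  if d.contains p.1 = false then d.insert p.1 p.2
  else d.insert p.1 (min (d.getD p.1 0) p.2)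

def pvStepB (d : PySem.Dict String (List Int)) (p : String × Int) : PySem.Dict String (List Int) :=
  d.modify p.1 [] (fun l => l ++ [p.2])

lemma pvStepA_eq_insert (d : PySem.Dict String Int) (p : String × Int) :
    pvStepA d p = d.insert p.1 (if d.contains p.1 = false then p.2 else min (d.getD p.1 0) p.2) := by
  unfold pvStepA; split_ifs <;> rfl

lemma pvA_eq_foldl (keymap : List String) :
    keymap_dict keymap = ((keymap.flatMap pvPairs).foldl pvStepA PySem.Dict.empty).items := by
  unfold keymap_dict
  rw [List.foldl_flatMap]
  congr 1
  apply PySem.List.foldl_congr_mem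
  intro d keys _
  unfold pvPairs
  rw [List.foldl_map, PySem.List.enumerate_eq_map_pyRange keys.toList ' ', List.foldl_map,
    PySem.Str.len_eq]
  rfl

lemma pvB_eq_foldl (keymap : List String) :
    keymap_dict_alt keymap
      = ((keymap.flatMap pvPairs).foldl pvStepB PySem.Dict.empty).items.map
          (fun p => (p.1, pyMinList p.2)) := by
  unfold keymap_dict_alt
  rw [List.foldl_flatMap]
  congr 2
  apply PySem.List.foldl_congr_mem
  intro d keys _
  unfold pvPairs
  rw [List.foldl_map]
  rfl

-- combine the running minimum state with one more value, as A does
def pvComb (o : Option Int) (v : Int) : Int :=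
  match o with
  | none => v
  | some m => min m v

lemma pvA_get? (L : List (String × Int)) (d : PySem.Dict String Int) (c : String) :
    (L.foldl pvStepA d).get? c
      = (match (L.filter (fun p => p.1 == c)).map (fun p => p.2) with
         | [] => d.get? c
         | h :: t => some (t.foldl min (pvComb (d.get? c) h))) := by
  induction L generalizing d with
  | nil => simp
  | cons p rest ih =>
    simp only [List.foldl_cons, List.filter_cons]
    by_cases hc : p.1 = c
    · subst hc
      rw [if_pos (by simp), List.map_cons, ih]
      have hins : (pvStepA d p).get? p.1 = some (pvComb (d.get? p.1) p.2) := by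
        rw [pvStepA_eq_insert, PySem.Dict.get?_insert_self]
        unfold pvComb
        rcases h : d.get? p.1 with _ | m
        · have : d.contains p.1 = false := by
            rw [PySem.Dict.contains_eq_isSome_get?, h]; rfl
          simp [this]
        · have hcont : d.contains p.1 = true := by
            rw [PySem.Dict.contains_eq_isSome_get?, h]; rfl
          simp [hcont, PySem.Dict.getD_of_get?_eq_some d 0 h]
      rw [hins]
      rcases hFe : (List.filter (fun p' => p'.1 == p.1) rest).map (fun p' => p'.2) with _ | ⟨h2, t2⟩ <;>
        simp only [hFe] <;> rfl
    · have hne : (p.1 == c) = false := by simp [hc]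
      rw [if_neg (by simp [hne]), ih]
      have : (pvStepA d p).get? c = d.get? c := by
        rw [pvStepA_eq_insert, PySem.Dict.get?_insert, if_neg (fun h => hc h.symm)]
      rw [this]

lemma pvFilter_ne_nil {L : List (String × Int)} {c : String} (hc : c ∈ L.map Prod.fst) :
    (L.filter (fun p => p.1 == c)).map (fun p => p.2) ≠ [] := by
  rcases List.mem_map.mp hc with ⟨p, hp, hpc⟩
  have : p ∈ L.filter (fun p => p.1 == c) := by
    rw [List.mem_filter]; exact ⟨hp, by simp [hpc]⟩
  intro h
  rcases List.map_eq_nil_iff.mp h with hnil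
  rw [hnil] at this
  exact (List.not_mem_nil) this

lemma pvMain (L : List (String × Int)) :
    (L.foldl pvStepA PySem.Dict.empty).items
      = ((L.foldl pvStepB PySem.Dict.empty).items).map (fun p => (p.1, pyMinList p.2)) := by
  set dA := L.foldl pvStepA PySem.Dict.empty with hdA
  set dB := L.foldl pvStepB PySem.Dict.empty with hdB
  have hAfold : dA = L.foldl (fun d x =>
      d.insert x.1 (if d.contains x.1 = false then x.2 else min (d.getD x.1 0) x.2))
      PySem.Dict.empty := by
    rw [hdA]; exact PySem.List.foldl_congr_mem _ _ _ _ (fun acc x _ => pvStepA_eq_insert acc x)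
  have hBfold : dB = L.foldl (fun d p => d.modify p.1 [] (fun l => l ++ [p.2]))
      PySem.Dict.empty := by rfl
  have hkA : dA.keys = PySem.Set.ofList (L.map Prod.fst) := by
    rw [hAfold, PySem.Dict.keys_foldl_insert_key L Prod.fst]; rfl
  have hkB : dB.keys = PySem.Set.ofList (L.map Prod.fst) := by
    rw [hBfold, PySem.Dict.keys_foldl_modify_key L Prod.fst]; rfl
  have hndA : dA.keys.Nodup := by
    rw [hAfold]
    exact PySem.Dict.nodup_keys_foldl_insert_key L Prod.fst _ _ PySem.Dict.nodup_keys_empty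
  have hndB : dB.keys.Nodup := by
    rw [hBfold]
    exact PySem.Dict.nodup_keys_foldl_modify_key L Prod.fst [] _ _ PySem.Dict.nodup_keys_empty
  rw [PySem.Dict.items_eq_map_keys dA hndA 0, PySem.Dict.items_eq_map_keys dB hndB [],
    List.map_map, hkA, hkB]
  apply List.map_congr_left
  intro k hk
  have hkmem : k ∈ L.map Prod.fst := by
    exact (PySem.Set.mem_ofList _ _).mp hk
  have hF := pvFilter_ne_nil hkmem
  rcases hFeq : (L.filter (fun p => p.1 == k)).map (fun p => p.2) with _ | ⟨h, t⟩
  · exact absurd hFeq hF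
  · have hgA : dA.get? k = some (t.foldl min h) := by
      rw [hdA, pvA_get? L PySem.Dict.empty k, hFeq]
      simp [PySem.Dict.get?_empty, pvComb]
    have hgB : dB.getD k [] = h :: t := by
      rw [hBfold, PySem.Dict.getD_foldl_modify_append, hFeq]
      simp [PySem.Dict.getD_empty]
    simp only [Function.comp]
    rw [PySem.Dict.getD_of_get?_eq_some _ 0 hgA, hgB]
    rfl

-- ===== VERDICT (by name: the statement is the Claim_ definition above) =====
theorem keymap_dict_spec : Claim_equal_keymap_dict := by
  intro keymap _
  unfold Spec_keymap_dict
  rw [pvA_eq_foldl, pvB_eq_foldl, pvMain]
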